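-- pv_equiv track=rewrite | github.com/z331225718/Panda | sp_process.py | rearrange_port_to_diff
-- ===== SOURCE A (Python) =====
-- def rearrange_port_to_diff(N):
--     lst = list(range(4 * N))
--     new_lst = [None] * (4 * N)
--
--     for i in range(N):
--         new_lst[4 * i] = lst[2 * i]
--         new_lst[4 * i + 1] = lst[2 * i + 1]
--         new_lst[4 * i + 2] = lst[2 * i + 2 * N]
--         new_lst[4 * i + 3] = lst[2 * i + 2 * N + 1]
--
--     return new_lst
-- ===== SOURCE B (Python) =====
-- def rearrange_port_to_diff(N):
--     first = list(range(2 * N))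
--     second = list(range(2 * N, 4 * N))
--     first_pairs = [first[2 * i:2 * i + 2] for i in range(N)]
--     second_pairs = [second[2 * i:2 * i + 2] for i in range(N)]
--     return [x for fp, sp in zip(first_pairs, second_pairs) for x in fp + sp]
-- ===== Notes on version B (the rewrite author's own statement) =====
-- stated objective: idiomatic
-- what changed: Instead of preallocating a 4N slot array and writing four computed offsets per iteration, B chunks the two half-ranges into consecutive pairs, zips the pair sequences and flattens, so the output is built structurally with no index arithmetic on a mutable buffer.
import Mathlib
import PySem

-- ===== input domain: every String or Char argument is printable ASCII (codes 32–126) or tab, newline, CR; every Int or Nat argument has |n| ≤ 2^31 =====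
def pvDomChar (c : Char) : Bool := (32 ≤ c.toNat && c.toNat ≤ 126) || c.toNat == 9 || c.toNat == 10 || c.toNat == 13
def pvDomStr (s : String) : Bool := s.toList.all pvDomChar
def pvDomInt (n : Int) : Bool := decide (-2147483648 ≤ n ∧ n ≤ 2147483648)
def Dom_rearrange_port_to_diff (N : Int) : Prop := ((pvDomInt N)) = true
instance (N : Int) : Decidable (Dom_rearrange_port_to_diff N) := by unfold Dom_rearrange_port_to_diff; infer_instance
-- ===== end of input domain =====

-- B replaces A's preallocated array and four computed write-offsets by building the
-- structure directly: chunk the two half-ranges into pairs, zip, and flatten (idiomatic).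

-- ===== PORT A =====
-- loop body of A, extracted as a helper (each line is one Python assignment)
def pvBodyA (lst : List Int) (acc : List (Option Int)) (i N : Int) : List (Option Int) :=
  let acc := PySem.List.pySetD acc (4*i) (some (PySem.List.pyGetD lst (2*i) 0))
  let acc := PySem.List.pySetD acc (4*i+1) (some (PySem.List.pyGetD lst (2*i+1) 0))
  let acc := PySem.List.pySetD acc (4*i+2) (some (PySem.List.pyGetD lst (2*i+2*N) 0))
  PySem.List.pySetD acc (4*i+3) (some (PySem.List.pyGetD lst (2*i+2*N+1) 0))

-- new_lst starts as [None]*(4*N): modelled as List (Option Int); the loop fills every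
-- slot, so the final reduceOption (exact here: no None remains for any N) recovers the
-- returned list of ints.
def rearrange_port_to_diff (N : Int) : List Int :=
  let lst := PySem.List.pyRange 0 (4*N) 1
  let new_lst : List (Option Int) := List.replicate (4*N).toNat none
  let new_lst := (PySem.List.pyRange 0 N 1).foldl (fun acc i => pvBodyA lst acc i N) new_lst
  new_lst.reduceOption

-- ===== PORT B =====
def rearrange_port_to_diff_alt (N : Int) : List Int :=
  let first := PySem.List.pyRange 0 (2*N) 1
  let second := PySem.List.pyRange (2*N) (4*N) 1
  let first_pairs := (PySem.List.pyRange 0 N 1).map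
    (fun i => PySem.List.slice first (some (2*i)) (some (2*i+2)))
  let second_pairs := (PySem.List.pyRange 0 N 1).map
    (fun i => PySem.List.slice second (some (2*i)) (some (2*i+2)))
  (first_pairs.zip second_pairs).flatMap (fun p => p.1 ++ p.2)

-- ===== PRECONDITION & SPEC =====
def Spec_rearrange_port_to_diff (N : Int) (out : List Int) : Prop := out = rearrange_port_to_diff_alt N
instance (N : Int) (out : List Int) : Decidable (Spec_rearrange_port_to_diff N out) := by unfold Spec_rearrange_port_to_diff; infer_instance

-- ===== CLAIM (what is proved, stated in full; the proofs are below) =====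
def Claim_equal_rearrange_port_to_diff : Prop := ∀ (N : Int), Dom_rearrange_port_to_diff N → Spec_rearrange_port_to_diff N (rearrange_port_to_diff N)

-- ===== LEMMAS AND PROOFS =====

-- the four values iteration i produces
def pvQuad (N i : Int) : List Int := [2*i, 2*i+1, 2*i+2*N, 2*i+2*N+1]

theorem pv_reduceOption_map_some {α : Type} (l : List α) :
    (l.map some).reduceOption = l := by
  induction l <;> simp_all [List.reduceOption]

theorem pv_get (b i : Int) (h0 : 0 ≤ i) (hb : i < b) :
    PySem.List.pyGetD (PySem.List.pyRange 0 b 1) i 0 = i := by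
  rw [PySem.List.pyGetD_eq_getElem _ _ h0
    (by simp [PySem.List.length_pyRange_one]; omega)]
  simp [PySem.List.getElem_pyRange_one]
  omega

theorem pv_slice (a b c : Int) (h0 : 0 ≤ c) (hb : a + c + 2 ≤ b) :
    PySem.List.slice (PySem.List.pyRange a b 1) (some c) (some (c+2)) = [a+c, a+c+1] := by
  rw [PySem.List.slice_toNat _ h0 (by omega)]
  rw [PySem.List.pyRange_one_append a (a+c) b (by omega) (by omega)]
  have h2 : (c+2).toNat - c.toNat = 2 := by omega
  have hlen : c.toNat = (PySem.List.pyRange a (a+c) 1).length := by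
    simp [PySem.List.length_pyRange_one]
  rw [h2, hlen, List.drop_left]
  rw [PySem.List.pyRange_one_cons (show a+c < b by omega),
      PySem.List.pyRange_one_cons (show a+c+1 < b by omega)]
  simp

theorem pv_len (N : Int) (l : List Int) : (l.flatMap (pvQuad N)).length = 4 * l.length := by
  induction l with
  | nil => rfl
  | cons a t ih => simp [pvQuad] at ih ⊢; omega

theorem pv_set_append {α : Type} (P t : List α) (k : Nat) (v : α) :
    (P ++ t).set (P.length + k) v = P ++ t.set k v := by
  simp

-- A's loop invariant: after the first j iterations the first 4*j slots are filled
theorem pv_loopA (N : Int) (hN : 0 < N) (j : Nat) (hj : (j:Int) ≤ N) :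
    (PySem.List.pyRange 0 (j:Int) 1).foldl
      (fun acc i => pvBodyA (PySem.List.pyRange 0 (4*N) 1) acc i N)
      (List.replicate (4*N).toNat none)
    = ((PySem.List.pyRange 0 (j:Int) 1).flatMap (pvQuad N)).map some
      ++ List.replicate ((4*(N-(j:Int))).toNat) none := by
  induction j with
  | zero =>
    rw [show ((0:Nat):Int) = 0 from rfl, PySem.List.pyRange_one_eq_nil (le_refl (0:Int))]
    simp
  | succ j ih =>
    have hjN : (j:Int) < N := by push_cast at hj; omega
    have hj' : (j:Int) ≤ N := le_of_lt hjN
    have hcast : ((j+1 : Nat) : Int) = (j:Int) + 1 := by push_cast; ring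
    rw [hcast, PySem.List.pyRange_one_succ_right (show (0:Int) ≤ (j:Int) by omega)]
    rw [List.foldl_append, ih hj']
    simp only [List.foldl_cons, List.foldl_nil, pvBodyA]
    rw [pv_get (4*N) (2*(j:Int)) (by omega) (by omega),
        pv_get (4*N) (2*(j:Int)+1) (by omega) (by omega),
        pv_get (4*N) (2*(j:Int)+2*N) (by omega) (by omega),
        pv_get (4*N) (2*(j:Int)+2*N+1) (by omega) (by omega)]
    set P : List (Option Int) := ((PySem.List.pyRange 0 (j:Int) 1).flatMap (pvQuad N)).map some with hP
    have hPlen : P.length = 4 * j := by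
      rw [hP, List.length_map, pv_len, PySem.List.length_pyRange_one]
      omega
    have hrep : (4*(N-(j:Int))).toNat = ((4*(N-((j:Int)+1))).toNat) + 4 := by omega
    rw [hrep]
    set m : Nat := (4*(N-((j:Int)+1))).toNat with hm
    have hrepm : List.replicate (m+4) (none : Option Int)
        = none :: none :: none :: none :: List.replicate m none := by
      rw [show m + 4 = 4 + m from Nat.add_comm m 4, List.replicate_add]
      rfl
    rw [hrepm]
    rw [PySem.List.pySetD_of_nonneg _ _ (show (0:Int) ≤ 4*(j:Int) by omega),
        show ((4*(j:Int)).toNat) = P.length + 0 by omega, pv_set_append]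
    rw [PySem.List.pySetD_of_nonneg _ _ (show (0:Int) ≤ 4*(j:Int)+1 by omega),
        show ((4*(j:Int)+1).toNat) = P.length + 1 by omega, pv_set_append]
    rw [PySem.List.pySetD_of_nonneg _ _ (show (0:Int) ≤ 4*(j:Int)+2 by omega),
        show ((4*(j:Int)+2).toNat) = P.length + 2 by omega, pv_set_append]
    rw [PySem.List.pySetD_of_nonneg _ _ (show (0:Int) ≤ 4*(j:Int)+3 by omega),
        show ((4*(j:Int)+3).toNat) = P.length + 3 by omega, pv_set_append]
    simp [List.set, pvQuad, List.flatMap_append]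
    exact hP

-- B's chunked zip collapses to the same flatMap of quads
theorem pv_altB (N : Int) :
    rearrange_port_to_diff_alt N
      = (PySem.List.pyRange 0 N 1).flatMap (pvQuad N) := by
  unfold rearrange_port_to_diff_alt
  simp only [List.zip_map', List.flatMap_map]
  apply List.flatMap_congr
  intro i hi
  rw [PySem.List.mem_pyRange_one] at hi
  rw [pv_slice 0 (2*N) (2*i) (by omega) (by omega),
      pv_slice (2*N) (4*N) (2*i) (by omega) (by omega)]
  simp [pvQuad]
  ring

-- ===== VERDICT (by name: the statement is the Claim_ definition above) =====
theorem rearrange_port_to_diff_spec : Claim_equal_rearrange_port_to_diff := by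
  intro N _
  unfold Spec_rearrange_port_to_diff
  rw [pv_altB]
  by_cases hN : 0 < N
  · have h := pv_loopA N hN N.toNat (by omega)
    rw [show ((N.toNat : Int)) = N by omega] at h
    unfold rearrange_port_to_diff
    simp only [h, show (4*(N-N)).toNat = 0 by omega, List.replicate_zero,
      List.append_nil]
    exact pv_reduceOption_map_some _
  · unfold rearrange_port_to_diff
    rw [PySem.List.pyRange_one_eq_nil (show N ≤ 0 by omega)]
    simp [show (4*N).toNat = 0 by omega, List.reduceOption]
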